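-- pv_equiv track=rewrite | github.com/Patrykmclaren14/Python | Tasks/czytanie json.py | zero_plentiful
-- ===== SOURCE A (Python) =====
-- def zero_plentiful(arr):
--         result = 0
--         amount = 0
--         for x in range(0,len(arr)):
--             if 0 in arr:
--                 if arr[x] == 0:
--                     result += 1
--                     if result >= 4:
--                         result = 0
--                         amount += 1
--                 else:
--                     if arr[x] != 0:
--                         result = 0
--             else: amount = 0
--         return amount
-- ===== SOURCE B (Python) =====
-- from itertools import groupby
--
-- def zero_plentiful(arr):
--     total = 0
--     for is_zero, group in groupby(arr, key=lambda x: x == 0):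
--         if is_zero:
--             total += len(list(group)) // 4
--     return total
-- ===== Notes on version B (the rewrite author's own statement) =====
-- stated objective: simpler
-- what changed: Replaces A's per-index loop with its modular reset counter and redundant per-iteration '0 in arr' membership scan by grouping the list into maximal runs via itertools.groupby and summing len(run)//4 over the zero runs.
import Mathlib
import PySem

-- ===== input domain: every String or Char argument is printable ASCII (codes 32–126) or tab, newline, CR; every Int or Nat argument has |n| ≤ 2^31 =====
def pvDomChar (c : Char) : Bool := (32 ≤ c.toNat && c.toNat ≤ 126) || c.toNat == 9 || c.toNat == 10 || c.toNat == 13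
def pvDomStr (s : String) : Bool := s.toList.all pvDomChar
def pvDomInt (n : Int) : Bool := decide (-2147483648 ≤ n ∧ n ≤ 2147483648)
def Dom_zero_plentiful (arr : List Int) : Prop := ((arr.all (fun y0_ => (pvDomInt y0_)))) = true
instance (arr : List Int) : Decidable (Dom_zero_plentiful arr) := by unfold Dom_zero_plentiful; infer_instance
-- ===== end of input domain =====

-- B replaces A's per-index loop (with its modular reset counter and a redundant per-iteration
-- '0 in arr' membership scan) by grouping the list into maximal runs and summing len(run)//4
-- over the zero runs; objective: simpler.


-- ===== PORT A =====
-- state = (result, amount); 'arr[x]' is always in range, ported as pyGetD with default 0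
def zero_plentiful (arr : List Int) : Int :=
  let st := (PySem.List.pyRange 0 arr.length 1).foldl
    (fun (s : Int × Int) x =>
      if (0 : Int) ∈ arr then
        if PySem.List.pyGetD arr x 0 = 0 then
          let result := s.1 + 1
          if result ≥ 4 then (0, s.2 + 1) else (result, s.2)
        else
          if PySem.List.pyGetD arr x 0 ≠ 0 then (0, s.2) else s
      else (s.1, 0)) (0, 0)
  st.2

-- ===== PORT B =====
-- itertools.groupby: peel one maximal run (takeWhile/dropWhile on 'x == 0') per step
def zero_plentiful_alt (arr : List Int) : Int :=
  match arr with
  | [] => 0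
  | x :: xs =>
    if x = 0 then
      (1 + ((xs.takeWhile (· == 0)).length : Int)) / 4
        + zero_plentiful_alt (xs.dropWhile (· == 0))
    else
      zero_plentiful_alt (xs.dropWhile (· != 0))
termination_by arr.length
decreasing_by
  · exact Nat.lt_succ_of_le (List.length_dropWhile_le _ _)
  · exact Nat.lt_succ_of_le (List.length_dropWhile_le _ _)

-- ===== PRECONDITION & SPEC =====
def Spec_zero_plentiful (arr : List Int) (out : Int) : Prop := out = zero_plentiful_alt arr
instance (arr : List Int) (out : Int) : Decidable (Spec_zero_plentiful arr out) := by unfold Spec_zero_plentiful; infer_instance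

-- ===== CLAIM (what is proved, stated in full; the proofs are below) =====
def Claim_equal_zero_plentiful : Prop := ∀ (arr : List Int), Dom_zero_plentiful arr → Spec_zero_plentiful arr (zero_plentiful arr)

-- ===== LEMMAS AND PROOFS =====

-- A's loop body when 0 ∈ arr, as a function of the current element
def stepA (s : Int × Int) (v : Int) : Int × Int :=
  if v = 0 then (if s.1 + 1 ≥ 4 then (0, s.2 + 1) else (s.1 + 1, s.2)) else (0, s.2)

-- the element-wise recursion underlying A's counter
def hA (r : Int) : List Int → Int
  | [] => 0
  | x :: xs => if x = 0 then (if r + 1 ≥ 4 then 1 + hA 0 xs else hA (r + 1) xs) else hA 0 xs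

theorem foldl_stepA (l : List Int) (r a : Int) :
    (l.foldl stepA (r, a)).2 = a + hA r l := by
  induction l generalizing r a with
  | nil => simp [hA]
  | cons x xs ih =>
    simp only [List.foldl_cons, stepA, hA]
    split_ifs with h1 h2 <;> simp [ih] <;> ring

theorem hA_dropNZ (l : List Int) : hA 0 (l.dropWhile (· != 0)) = hA 0 l := by
  induction l with
  | nil => rfl
  | cons x xs ih =>
    by_cases hx : x = 0
    · simp [hx, List.dropWhile]
    · rw [List.dropWhile_cons]
      simp only [show (x != 0) = true from by simpa using hx, if_true]
      rw [show hA 0 (x :: xs) = hA 0 xs from by simp [hA, hx]]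
      exact ih

theorem hA_run (l : List Int) (r : Int) (h0 : 0 ≤ r) (h4 : r < 4) :
    hA r l = (r + ((l.takeWhile (· == 0)).length : Int)) / 4
      + hA 0 (l.dropWhile (· == 0)) := by
  induction l generalizing r with
  | nil =>
    simp [hA, List.takeWhile, List.dropWhile]
    omega
  | cons x xs ih =>
    by_cases hx : x = 0
    · subst hx
      simp only [hA, if_pos rfl, List.takeWhile_cons, List.dropWhile_cons, beq_self_eq_true,
        if_true, List.length_cons]
      by_cases h14 : r + 1 ≥ 4
      · rw [if_pos h14, ih 0 le_rfl (by norm_num)]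
        have hr : r = 3 := by omega
        subst hr
        generalize hA 0 (List.dropWhile (fun x => x == 0) xs) = H
        push_cast
        omega
      · rw [if_neg h14, ih (r + 1) (by omega) (by omega)]
        generalize hA 0 (List.dropWhile (fun x => x == 0) xs) = H
        push_cast
        omega
    · rw [List.takeWhile_cons, List.dropWhile_cons]
      simp only [show (x == 0) = false from by simpa using hx, Bool.false_eq_true, if_false]
      rw [show hA r (x :: xs) = hA 0 xs from by simp [hA, hx],
        show hA 0 (x :: xs) = hA 0 xs from by simp [hA, hx]]
      have h4' : r / 4 = 0 := by omega
      simp [h4']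

theorem hA_eq_alt (l : List Int) : hA 0 l = zero_plentiful_alt l := by
  induction hl : l.length using Nat.strong_induction_on generalizing l with
  | _ n ih =>
    match l with
    | [] => simp [hA, zero_plentiful_alt]
    | x :: xs =>
      by_cases hx : x = 0
      · rw [zero_plentiful_alt, if_pos hx]
        rw [show hA 0 (x :: xs) = hA 1 xs by simp [hA, hx]]
        rw [hA_run xs 1 (by norm_num) (by norm_num)]
        rw [ih (xs.dropWhile (· == 0)).length
          (by subst hl; exact Nat.lt_succ_of_le (List.length_dropWhile_le _ _)) _ rfl]
      · rw [zero_plentiful_alt, if_neg hx]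
        rw [show hA 0 (x :: xs) = hA 0 xs by simp [hA, hx]]
        rw [← hA_dropNZ xs]
        rw [ih (xs.dropWhile (· != 0)).length
          (by subst hl; exact Nat.lt_succ_of_le (List.length_dropWhile_le _ _)) _ rfl]

theorem alt_no_zero (l : List Int) (h : (0 : Int) ∉ l) : zero_plentiful_alt l = 0 := by
  rw [← hA_eq_alt]
  induction l with
  | nil => rfl
  | cons x xs ih =>
    have hx : x ≠ 0 := fun e => h (e ▸ List.mem_cons_self)
    rw [show hA 0 (x :: xs) = hA 0 xs by simp [hA, hx]]
    exact ih (fun m => h (List.mem_cons_of_mem _ m))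

-- ===== VERDICT (by name: the statement is the Claim_ definition above) =====
theorem zero_plentiful_spec : Claim_equal_zero_plentiful := by
  intro arr _
  unfold Spec_zero_plentiful zero_plentiful
  by_cases hm : (0 : Int) ∈ arr
  · simp only [hm, if_pos, if_true]
    rw [show (fun (s : Int × Int) x =>
        if PySem.List.pyGetD arr x 0 = 0 then
          let result := s.1 + 1
          if result ≥ 4 then (0, s.2 + 1) else (result, s.2)
        else
          if PySem.List.pyGetD arr x 0 ≠ 0 then (0, s.2) else s)
      = (fun (s : Int × Int) x => stepA s (PySem.List.pyGetD arr x 0)) from by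
        funext s x
        simp only [stepA]
        split_ifs <;> simp_all]
    rw [PySem.List.foldl_pyRange_zero_pyGetD' arr 0 stepA (0, 0)]
    rw [foldl_stepA, hA_eq_alt]
    ring
  · simp only [hm, if_neg, if_false]
    rw [alt_no_zero arr hm]
    have : ∀ (l : List Int) (s : Int × Int),
        (l.foldl (fun (s : Int × Int) _ => (s.1, 0)) s).2 = if l = [] then s.2 else 0 := by
      intro l
      induction l with
      | nil => simp
      | cons y ys ih => intro s; simp [ih]
    rw [this]
    split <;> rfl
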